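-- pv_equiv track=rewrite | github.com/dlorp/synapse-engine | backend/app/services/routing.py | _detect_pattern_type
-- ===== SOURCE A (Python) =====
-- from typing import List
--
-- SIMPLE_PATTERNS: List[str] = [
--     "what is",
--     "what are",
--     "define",
--     "definition of",
--     "who is",
--     "who was",
--     "when was",
--     "when did",
--     "where is",
--     "where was",
--     "list",
--     "name"
-- ]
--
-- MODERATE_PATTERNS: List[str] = [
--     "explain",
--     "describe",
--     "compare",
--     "summarize",
--     "how does",
--     "how do",
--     "why does",
--     "why do",
--     "difference between",
--     "similarities between",
--     "contrast",
--     "overview of"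
-- ]
--
-- COMPLEX_PATTERNS: List[str] = [
--     "analyze",
--     "evaluate",
--     "assess",
--     "design",
--     "architect",
--     "synthesize",
--     "critique",
--     "propose",
--     "develop",
--     "formulate",
--     "justify",
--     "argue",
--     "defend",
--     "refute"
-- ]
--
-- def _detect_pattern_type(query_lower: str) -> str:
--     """Detect the dominant pattern type in the query.
--
--     Args:
--         query_lower: Lowercased query text
--
--     Returns:
--         Pattern type: "simple", "moderate", "complex", or "none"
--     """
--     # Check in order of complexity (highest first)
--     for pattern in COMPLEX_PATTERNS:
--         if pattern in query_lower:
--             return "complex"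
--
--     for pattern in MODERATE_PATTERNS:
--         if pattern in query_lower:
--             return "moderate"
--
--     for pattern in SIMPLE_PATTERNS:
--         if pattern in query_lower:
--             return "simple"
--
--     return "none"
-- ===== SOURCE B (Python) =====
-- from typing import List
--
-- SIMPLE_PATTERNS: List[str] = [
--     "what is", "what are", "define", "definition of", "who is", "who was",
--     "when was", "when did", "where is", "where was", "list", "name"
-- ]
-- MODERATE_PATTERNS: List[str] = [
--     "explain", "describe", "compare", "summarize", "how does", "how do",
--     "why does", "why do", "difference between", "similarities between",
--     "contrast", "overview of"
-- ]
-- COMPLEX_PATTERNS: List[str] = [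
--     "analyze", "evaluate", "assess", "design", "architect", "synthesize",
--     "critique", "propose", "develop", "formulate", "justify", "argue",
--     "defend", "refute"
-- ]
--
-- _PRIORITY: List[tuple] = (
--     [(p, 1) for p in SIMPLE_PATTERNS]
--     + [(p, 2) for p in MODERATE_PATTERNS]
--     + [(p, 3) for p in COMPLEX_PATTERNS]
-- )
-- _NAMES: List[str] = ["none", "simple", "moderate", "complex"]
--
-- def _detect_pattern_type(query_lower: str) -> str:
--     best = 0
--     for pattern, level in _PRIORITY:
--         if pattern in query_lower:
--             best = max(best, level)
--     return _NAMES[best]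
-- ===== Notes on version B (the rewrite author's own statement) =====
-- stated objective: alternative
-- what changed: Replaces the three ordered early-returning loops with one pass over a single pattern->priority list that accumulates the maximum priority seen, then maps that maximum back to its name.
import Mathlib
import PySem

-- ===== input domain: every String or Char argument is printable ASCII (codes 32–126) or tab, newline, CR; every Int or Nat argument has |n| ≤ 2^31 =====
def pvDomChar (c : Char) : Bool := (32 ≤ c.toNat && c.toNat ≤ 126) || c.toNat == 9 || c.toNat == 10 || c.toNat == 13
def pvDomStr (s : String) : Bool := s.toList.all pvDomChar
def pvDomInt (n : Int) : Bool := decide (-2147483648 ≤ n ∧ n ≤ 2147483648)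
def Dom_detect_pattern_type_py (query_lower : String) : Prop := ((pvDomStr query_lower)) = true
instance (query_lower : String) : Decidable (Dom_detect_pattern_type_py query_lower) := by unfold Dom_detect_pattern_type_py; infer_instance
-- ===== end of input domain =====

-- B replaces A's three ordered early-returning loops by a single accumulate-the-max pass
-- over one tagged pattern list plus a name lookup (objective: alternative decomposition).

-- ===== PORT A =====
def pvSimplePatterns : List String :=
  ["what is", "what are", "define", "definition of", "who is", "who was",
   "when was", "when did", "where is", "where was", "list", "name"]

def pvModeratePatterns : List String :=
  ["explain", "describe", "compare", "summarize", "how does", "how do",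
   "why does", "why do", "difference between", "similarities between",
   "contrast", "overview of"]

def pvComplexPatterns : List String :=
  ["analyze", "evaluate", "assess", "design", "architect", "synthesize",
   "critique", "propose", "develop", "formulate", "justify", "argue",
   "defend", "refute"]

-- one 'for pattern in PATTERNS: if pattern in query_lower: return label' loop of A
def pvScanFor (ps : List String) (label : String) (query_lower : String) : Option String :=
  match ps with
  | [] => none
  | p :: rest => if PySem.Str.isIn p query_lower then some label else pvScanFor rest label query_lower

def detect_pattern_type_py (query_lower : String) : String :=
  match pvScanFor pvComplexPatterns "complex" query_lower with
  | some r => r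
  | none =>
    match pvScanFor pvModeratePatterns "moderate" query_lower with
    | some r => r
    | none =>
      match pvScanFor pvSimplePatterns "simple" query_lower with
      | some r => r
      | none => "none"

-- ===== PORT B =====
def pvPriority : List (String × Nat) :=
  pvSimplePatterns.map (fun p => (p, 1))
    ++ pvModeratePatterns.map (fun p => (p, 2))
    ++ pvComplexPatterns.map (fun p => (p, 3))

def pvNames : List String := ["none", "simple", "moderate", "complex"]

def detect_pattern_type_py_alt (query_lower : String) : String :=
  let best := pvPriority.foldl
    (fun best pl => if PySem.Str.isIn pl.1 query_lower then max best pl.2 else best) 0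
  pvNames.getD best ""

-- ===== PRECONDITION & SPEC =====
def Spec_detect_pattern_type_py (query_lower : String) (out : String) : Prop := out = detect_pattern_type_py_alt query_lower
instance (query_lower : String) (out : String) : Decidable (Spec_detect_pattern_type_py query_lower out) := by unfold Spec_detect_pattern_type_py; infer_instance

-- ===== CLAIM (what is proved, stated in full; the proofs are below) =====
def Claim_equal_detect_pattern_type_py : Prop := ∀ (query_lower : String), Dom_detect_pattern_type_py query_lower → Spec_detect_pattern_type_py query_lower (detect_pattern_type_py query_lower)

-- ===== LEMMAS AND PROOFS =====

-- A's loop returns its label iff some pattern of its list occurs in the query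
theorem pvScanFor_eq (ps : List String) (label q : String) :
    pvScanFor ps label q = if ps.any (fun p => PySem.Str.isIn p q) then some label else none := by
  induction ps with
  | nil => simp [pvScanFor]
  | cons p rest ih =>
    simp only [pvScanFor, List.any_cons, ih]
    by_cases h : PySem.Str.isIn p q = true <;>
      simp only [PySem.Str.isIn_eq] at h <;> simp [h]

-- B's fold over a constant-priority block collapses to an 'any' test
theorem pvFoldTag (ps : List String) (k : Nat) (q : String) (acc : Nat) :
    (ps.map (fun p => (p, k))).foldl
        (fun best pl => if PySem.Str.isIn pl.1 q then max best pl.2 else best) acc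
      = if ps.any (fun p => PySem.Str.isIn p q) then max acc k else acc := by
  induction ps generalizing acc with
  | nil => simp
  | cons p rest ih =>
    simp only [List.map_cons, List.foldl_cons, List.any_cons]
    simp only [PySem.Str.isIn_eq] at ih
    by_cases h : PySem.Str.isIn p q = true <;>
      simp only [PySem.Str.isIn_eq] at h <;>
        simp [h, ih]

theorem detect_pattern_type_py_eq_alt (q : String) :
    detect_pattern_type_py q = detect_pattern_type_py_alt q := by
  unfold detect_pattern_type_py detect_pattern_type_py_alt pvPriority
  rw [List.foldl_append, List.foldl_append, pvFoldTag, pvFoldTag, pvFoldTag,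
      pvScanFor_eq, pvScanFor_eq, pvScanFor_eq]
  cases hc : pvComplexPatterns.any (fun p => PySem.Str.isIn p q) <;>
    cases hm : pvModeratePatterns.any (fun p => PySem.Str.isIn p q) <;>
      cases hs : pvSimplePatterns.any (fun p => PySem.Str.isIn p q) <;>
        simp only [hc, hm, hs] <;> simp [pvNames]

-- ===== VERDICT (by name: the statement is the Claim_ definition above) =====
theorem detect_pattern_type_py_spec : Claim_equal_detect_pattern_type_py := by
  intro q _
  exact detect_pattern_type_py_eq_alt q
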